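-- pv_equiv track=rewrite | github.com/smthomas-sci/SemanticSegmentation | whole_image_predict.py | calculate_tile_size
-- ===== SOURCE A (Python) =====
-- def calculate_tile_size(image_shape, lower=50, upper=150):
--     """
--     Calculates a tile size with optimal overlap
--
--     Input:
--
--         image - original histo image (large size)
--
--         lower - lowerbound threshold for overlap
--
--         upper - upper-bound threshold for overlap
--
--     Output:
--
--         dim - dimension of tile
--
--         threshold - calculated overlap for tile and input image
--     """
--     dims = [x * 2 ** 5 for x in range(1, 80, 2)]
--     w = image_shape[1]
--     h = image_shape[0]
--     thresholds = {}
--     for d in dims: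
--         w_steps = w // d
--         w_overlap = (d - (w % d)) // w_steps
--         h_steps = h // d
--         h_overlap = (d - (h % d)) // h_steps
--         # Threshold is the half the minimum overlap
--         thresholds[d] = min(w_overlap, h_overlap) // 2
--     # Loop through pairs and take first that satisfies
--     for d, t in sorted(thresholds.items(), key=lambda x: x[1]):
--         if lower < t < upper:
--             if d <= 1408:
--                 return d, t  # dim, threshold
-- ===== SOURCE B (Python) =====
-- def calculate_tile_size(image_shape, lower=50, upper=150):
--     dims = [x * 2 ** 5 for x in range(1, 80, 2)]
--     w = image_shape[1]
--     h = image_shape[0]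
--     best = None
--     for d in dims:
--         t = min((d - (w % d)) // (w // d), (d - (h % d)) // (h // d)) // 2
--         if lower < t < upper and d <= 1408:
--             if best is None or t < best[1]:
--                 best = (d, t)
--     return best
-- ===== Notes on version B (the rewrite author's own statement) =====
-- stated objective: simpler
-- what changed: B drops A's thresholds dict, the stable sort by threshold and the post-sort scan, keeping instead a single running best (strict '<' update over dims in ascending order reproduces the sort's min-threshold/smallest-dim tie-breaking) in one pass.
import Mathlib
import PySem

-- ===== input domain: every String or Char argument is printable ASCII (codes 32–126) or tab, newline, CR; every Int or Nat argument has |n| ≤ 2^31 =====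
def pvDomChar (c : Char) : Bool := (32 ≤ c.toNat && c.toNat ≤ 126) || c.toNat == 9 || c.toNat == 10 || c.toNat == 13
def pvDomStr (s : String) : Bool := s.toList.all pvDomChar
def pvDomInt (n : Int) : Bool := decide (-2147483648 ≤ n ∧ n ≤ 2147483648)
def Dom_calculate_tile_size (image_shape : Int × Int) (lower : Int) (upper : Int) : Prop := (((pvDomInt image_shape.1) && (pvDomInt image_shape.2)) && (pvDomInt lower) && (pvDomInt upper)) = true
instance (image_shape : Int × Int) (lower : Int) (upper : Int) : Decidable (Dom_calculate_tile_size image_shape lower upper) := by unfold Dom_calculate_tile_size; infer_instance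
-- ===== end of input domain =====

-- B replaces A's thresholds-dict + stable sort + scan by a single running-best pass over the
-- dims (strict '<' update reproduces the sort's tie-breaking); objective: simpler.

-- ===== PORT A =====
def calculate_tile_size (image_shape : Int × Int) (lower : Int) (upper : Int) : Option (Int × Int) :=
  let dims : List Int := (PySem.List.pyRange 1 80 2).map (fun x => x * 2 ^ 5)
  let w := image_shape.2
  let h := image_shape.1
  let thresholds : PySem.Dict Int Int :=
    dims.foldl (fun th d =>
      let w_steps := PySem.Int.floordiv w d
      let w_overlap := PySem.Int.floordiv (d - PySem.Int.mod w d) w_steps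
      let h_steps := PySem.Int.floordiv h d
      let h_overlap := PySem.Int.floordiv (d - PySem.Int.mod h d) h_steps
      th.insert d (PySem.Int.floordiv (min w_overlap h_overlap) 2)) PySem.Dict.empty
  (PySem.List.sorted thresholds.items (fun x => x.2) false).find?
    (fun p => decide (lower < p.2) && decide (p.2 < upper) && decide (p.1 ≤ 1408))

-- ===== PORT B =====
def calculate_tile_size_alt (image_shape : Int × Int) (lower : Int) (upper : Int) : Option (Int × Int) :=
  let dims : List Int := (PySem.List.pyRange 1 80 2).map (fun x => x * 2 ^ 5)
  let w := image_shape.2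
  let h := image_shape.1
  dims.foldl (fun best d =>
    let t := PySem.Int.floordiv
      (min (PySem.Int.floordiv (d - PySem.Int.mod w d) (PySem.Int.floordiv w d))
           (PySem.Int.floordiv (d - PySem.Int.mod h d) (PySem.Int.floordiv h d))) 2
    if lower < t ∧ t < upper ∧ d ≤ 1408 then
      match best with
      | none => some (d, t)
      | some b => if t < b.2 then some (d, t) else best
    else best) none

-- ===== PRECONDITION & SPEC =====
-- Pre_ excludes exactly the inputs on which the Python A raises ZeroDivisionError
-- (w_steps or h_steps is 0 for some dim, i.e. 0 ≤ w < 2528 or 0 ≤ h < 2528).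
def Pre_calculate_tile_size (image_shape : Int × Int) (lower : Int) (upper : Int) : Prop :=
  (image_shape.2 < 0 ∨ 2528 ≤ image_shape.2) ∧ (image_shape.1 < 0 ∨ 2528 ≤ image_shape.1)
instance (image_shape : Int × Int) (lower : Int) (upper : Int) : Decidable (Pre_calculate_tile_size image_shape lower upper) := by unfold Pre_calculate_tile_size; infer_instance

def pvWitness_calculate_tile_size : (Int × Int) × Int × Int := ((2528, 3000), 50, 150)

def Spec_calculate_tile_size (image_shape : Int × Int) (lower : Int) (upper : Int) (out : Option (Int × Int)) : Prop := out = calculate_tile_size_alt image_shape lower upper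
instance (image_shape : Int × Int) (lower : Int) (upper : Int) (out : Option (Int × Int)) : Decidable (Spec_calculate_tile_size image_shape lower upper out) := by unfold Spec_calculate_tile_size; infer_instance

-- ===== CLAIM (what is proved, stated in full; the proofs are below) =====
def Claim_equal_calculate_tile_size : Prop := ∀ (image_shape : Int × Int) (lower : Int) (upper : Int), Dom_calculate_tile_size image_shape lower upper → Pre_calculate_tile_size image_shape lower upper → Spec_calculate_tile_size image_shape lower upper (calculate_tile_size image_shape lower upper)

-- ===== LEMMAS AND PROOFS =====

-- the per-dim threshold both programs compute
def pvT (w h d : Int) : Int :=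
  PySem.Int.floordiv
    (min (PySem.Int.floordiv (d - PySem.Int.mod w d) (PySem.Int.floordiv w d))
         (PySem.Int.floordiv (d - PySem.Int.mod h d) (PySem.Int.floordiv h d))) 2

-- the candidate test, as a Bool (A's find? predicate)
def pvP (lower upper : Int) (p : Int × Int) : Bool :=
  decide (lower < p.2) && decide (p.2 < upper) && decide (p.1 ≤ 1408)

-- B's running-best update, for an arbitrary Bool candidate test
def pvStep (P : Int × Int → Bool) (best : Option (Int × Int)) (p : Int × Int) : Option (Int × Int) :=
  if P p then
    match best with
    | none => some p
    | some b => if p.2 < b.2 then some p else best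
  else best

theorem pvFind?_insertBy (P : Int × Int → Bool) (x : Int × Int) (s : List (Int × Int))
    (hs : s.Pairwise (fun a b => a.2 ≤ b.2)) :
    (PySem.List.insertBy (fun a b => decide (a.2 < b.2)) x s).find? P
      = pvStep P (s.find? P) x := by
  induction s with
  | nil => simp [PySem.List.insertBy, pvStep]
  | cons y ys ih =>
    rcases List.pairwise_cons.mp hs with ⟨hy, hys⟩
    by_cases hlt : x.2 < y.2
    · simp only [PySem.List.insertBy, hlt, decide_true, if_true]
      by_cases hPx : P x
      · -- x satisfies P: it is found first; any earlier find? hit has larger snd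
        have hfx : List.find? P (x :: y :: ys) = some x := by simp [List.find?, hPx]
        rw [hfx]
        simp only [pvStep, hPx, if_true]
        cases hfy : List.find? P (y :: ys) with
        | none => rfl
        | some b =>
          have hb : b ∈ y :: ys := List.mem_of_find?_eq_some hfy
          have hyb : y.2 ≤ b.2 := by
            rcases List.mem_cons.mp hb with h | h
            · exact le_of_eq (by rw [h])
            · exact hy b h
          simp [lt_of_lt_of_le hlt hyb]
      · have hfx : List.find? P (x :: y :: ys) = List.find? P (y :: ys) := by
          simp [List.find?, hPx]
        rw [hfx]
        simp only [pvStep, hPx, Bool.false_eq_true, if_false]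
    · simp only [PySem.List.insertBy, hlt, decide_false, Bool.false_eq_true, if_false]
      by_cases hPy : P y
      · have h1 : List.find? P (y :: PySem.List.insertBy (fun a b => decide (a.2 < b.2)) x ys) = some y := by
          simp [List.find?, hPy]
        have h2 : List.find? P (y :: ys) = some y := by simp [List.find?, hPy]
        rw [h1, h2]
        simp only [pvStep]
        by_cases hPx : P x
        · rw [if_pos hPx, if_neg (by exact hlt)]
        · rw [if_neg hPx]
      · have h1 : List.find? P (y :: PySem.List.insertBy (fun a b => decide (a.2 < b.2)) x ys)
            = List.find? P (PySem.List.insertBy (fun a b => decide (a.2 < b.2)) x ys) := by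
          simp [List.find?, hPy]
        have h2 : List.find? P (y :: ys) = List.find? P ys := by simp [List.find?, hPy]
        rw [h1, h2]
        exact ih hys

theorem pvSorted_find?_eq_foldl (P : Int × Int → Bool) (l : List (Int × Int)) :
    (PySem.List.sorted l (fun p => p.2) false).find? P = l.foldl (pvStep P) none := by
  induction l using List.reverseRecOn with
  | nil => simp [PySem.List.sorted_eq_foldl_insertBy]
  | append_singleton l x ih =>
    have hlem := pvFind?_insertBy P x (PySem.List.sorted l (fun p => p.2) false)
      (PySem.List.sorted_pairwise l (fun p => p.2))
    have hsort : PySem.List.sorted (l ++ [x]) (fun p => p.2) false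
        = PySem.List.insertBy (fun a b => decide (a.2 < b.2)) x
            (PySem.List.sorted l (fun p => p.2) false) := by
      rw [PySem.List.sorted_eq_foldl_insertBy, PySem.List.sorted_eq_foldl_insertBy,
        List.foldl_append]
      rfl
    rw [hsort, hlem, ih, List.foldl_append]
    rfl

-- A computed as find? over the sorted mapped dims
theorem pvA_eq (image_shape : Int × Int) (lower upper : Int) :
    calculate_tile_size image_shape lower upper
      = (PySem.List.sorted
          (((PySem.List.pyRange 1 80 2).map (fun x => x * 2 ^ 5)).map
            (fun d => (d, pvT image_shape.2 image_shape.1 d)))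
          (fun p => p.2) false).find? (pvP lower upper) := by
  unfold calculate_tile_size
  dsimp only
  rw [PySem.Dict.items_foldl_insert_fresh _ (fun a => a)
    (fun d => PySem.Int.floordiv
      (min (PySem.Int.floordiv (d - PySem.Int.mod image_shape.2 d) (PySem.Int.floordiv image_shape.2 d))
           (PySem.Int.floordiv (d - PySem.Int.mod image_shape.1 d) (PySem.Int.floordiv image_shape.1 d))) 2)
    PySem.Dict.empty (fun a _ => PySem.Dict.contains_empty a) (by decide)]
  rw [show (PySem.Dict.empty : PySem.Dict Int Int).items = [] from rfl, List.nil_append]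
  unfold pvP pvT
  simp

-- B computed as the running-best fold over the same mapped dims
theorem pvB_eq (image_shape : Int × Int) (lower upper : Int) :
    calculate_tile_size_alt image_shape lower upper
      = (((PySem.List.pyRange 1 80 2).map (fun x => x * 2 ^ 5)).map
          (fun d => (d, pvT image_shape.2 image_shape.1 d))).foldl (pvStep (pvP lower upper)) none := by
  unfold calculate_tile_size_alt
  dsimp only
  rw [List.foldl_map, List.foldl_map, List.foldl_map]
  apply PySem.List.foldl_congr_mem
  intro acc x _
  dsimp only
  simp only [pvStep, pvP, pvT, Bool.and_eq_true, decide_eq_true_eq, and_assoc]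

-- ===== VERDICT (by name: the statement is the Claim_ definition above) =====
theorem calculate_tile_size_spec : Claim_equal_calculate_tile_size := by
  intro image_shape lower upper _ _
  unfold Spec_calculate_tile_size
  rw [pvA_eq, pvB_eq, pvSorted_find?_eq_foldl]
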